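-- pv_equiv track=rewrite | github.com/MrBrantCode/unitest_baseline | mut_generate/mist_train_cf/cf_85613/solution.py | calculate_special_tuples
-- ===== SOURCE A (Python) =====
-- def calculate_special_tuples(lst):
--     pos_evens, neg_evens, odds = set(), set(), set()
--     pos_evens_squared_sum, neg_evens_squared_sum, odds_cubed_sum, odds_product = 0, 0, 0, 1
--
--     for num in lst:
--         if num:
--             if num > 0:
--                 if num % 2 == 0:
--                     if num not in pos_evens:
--                         pos_evens.add(num)
--                         pos_evens_squared_sum += num ** 2
--                 else:
--                     if num not in odds:
--                         odds.add(num)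
--                         odds_product *= num
--                     odds_cubed_sum += num ** 3
--
--             elif num < 0 and num % 2 == 0:
--                 if num not in neg_evens:
--                     neg_evens.add(num)
--                     neg_evens_squared_sum += num ** 2
--
--     return len(pos_evens), len(neg_evens), pos_evens_squared_sum, neg_evens_squared_sum, odds_cubed_sum, odds_product
-- ===== SOURCE B (Python) =====
-- def calculate_special_tuples(lst):
--     pos_evens = list(dict.fromkeys(n for n in lst if n > 0 and n % 2 == 0))
--     neg_evens = list(dict.fromkeys(n for n in lst if n < 0 and n % 2 == 0))
--     odds = list(dict.fromkeys(n for n in lst if n > 0 and n % 2 != 0))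
--     odds_product = 1
--     for n in odds:
--         odds_product *= n
--     return (len(pos_evens), len(neg_evens),
--             sum(n ** 2 for n in pos_evens),
--             sum(n ** 2 for n in neg_evens),
--             sum(n ** 3 for n in lst if n > 0 and n % 2 != 0),
--             odds_product)
-- ===== Notes on version B (the rewrite author's own statement) =====
-- stated objective: simpler
-- what changed: Replaces the single fused loop with nested membership branches by independent filtered passes: dict.fromkeys-deduplicated lists per category, from which counts, squared sums and the product are computed directly; only the cubed sum scans the whole list.
import Mathlib
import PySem

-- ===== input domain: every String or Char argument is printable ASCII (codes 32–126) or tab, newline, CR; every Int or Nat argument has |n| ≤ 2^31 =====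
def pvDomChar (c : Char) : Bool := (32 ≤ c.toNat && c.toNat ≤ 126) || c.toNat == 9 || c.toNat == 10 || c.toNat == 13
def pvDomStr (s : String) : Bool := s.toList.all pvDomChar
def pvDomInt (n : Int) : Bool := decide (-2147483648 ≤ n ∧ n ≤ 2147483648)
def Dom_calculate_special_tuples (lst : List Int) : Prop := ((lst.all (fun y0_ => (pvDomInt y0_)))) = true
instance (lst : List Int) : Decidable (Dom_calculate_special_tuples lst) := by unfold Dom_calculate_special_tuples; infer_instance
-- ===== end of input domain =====

-- B replaces A's single fused loop by independent filtered passes (dedup per category, then direct aggregates); objective: simpler.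

-- ===== PORT A =====
-- loop body of A's for-loop (state: pos_evens, neg_evens, odds, pos_evens_squared_sum, neg_evens_squared_sum, odds_cubed_sum, odds_product)
def pvStepA (s : PySem.Set Int × PySem.Set Int × PySem.Set Int × Int × Int × Int × Int) (num : Int) :
    PySem.Set Int × PySem.Set Int × PySem.Set Int × Int × Int × Int × Int :=
  let (pe, ne, od, a, b, c, p) := s
  if num ≠ 0 then
    if num > 0 then
      if PySem.Int.mod num 2 == 0 then
        if ¬ PySem.Set.contains pe num then (PySem.Set.add pe num, ne, od, a + num ^ 2, b, c, p)
        else s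
      else
        if ¬ PySem.Set.contains od num then (pe, ne, PySem.Set.add od num, a, b, c + num ^ 3, p * num)
        else (pe, ne, od, a, b, c + num ^ 3, p)
    else if num < 0 ∧ PySem.Int.mod num 2 == 0 then
      if ¬ PySem.Set.contains ne num then (pe, PySem.Set.add ne num, od, a, b + num ^ 2, c, p)
      else s
    else s
  else s

def calculate_special_tuples (lst : List Int) : Int × Int × Int × Int × Int × Int :=
  let st := lst.foldl pvStepA (PySem.Set.empty, PySem.Set.empty, PySem.Set.empty, 0, 0, 0, 1)
  ((PySem.Set.len st.1 : Int), (PySem.Set.len st.2.1 : Int), st.2.2.2.1, st.2.2.2.2.1, st.2.2.2.2.2.1, st.2.2.2.2.2.2)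

-- ===== PORT B =====
-- the three filter conditions of Source B's comprehensions
def pvPosEven (n : Int) : Bool := decide (n > 0) && (PySem.Int.mod n 2 == 0)
def pvNegEven (n : Int) : Bool := decide (n < 0) && (PySem.Int.mod n 2 == 0)
def pvPosOdd (n : Int) : Bool := decide (n > 0) && !(PySem.Int.mod n 2 == 0)

def calculate_special_tuples_alt (lst : List Int) : Int × Int × Int × Int × Int × Int :=
  let pos_evens := PySem.List.dedup (lst.filter pvPosEven)
  let neg_evens := PySem.List.dedup (lst.filter pvNegEven)
  let odds := PySem.List.dedup (lst.filter pvPosOdd)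
  let odds_product := odds.foldl (fun p n => p * n) 1
  ((pos_evens.length : Int), (neg_evens.length : Int),
   (pos_evens.map (fun n => n ^ 2)).sum,
   (neg_evens.map (fun n => n ^ 2)).sum,
   ((lst.filter pvPosOdd).map (fun n => n ^ 3)).sum,
   odds_product)

-- ===== PRECONDITION & SPEC =====
def Spec_calculate_special_tuples (lst : List Int) (out : Int × Int × Int × Int × Int × Int) : Prop := out = calculate_special_tuples_alt lst
instance (lst : List Int) (out : Int × Int × Int × Int × Int × Int) : Decidable (Spec_calculate_special_tuples lst out) := by unfold Spec_calculate_special_tuples; infer_instance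

-- ===== CLAIM (what is proved, stated in full; the proofs are below) =====
def Claim_equal_calculate_special_tuples : Prop := ∀ (lst : List Int), Dom_calculate_special_tuples lst → Spec_calculate_special_tuples lst (calculate_special_tuples lst)

-- ===== LEMMAS AND PROOFS =====

-- closed form of A's loop state: the three sets are the deduped filtered lists and the accumulators are B's aggregates
theorem pvLoopClosed (lst : List Int) :
    lst.foldl pvStepA (PySem.Set.empty, PySem.Set.empty, PySem.Set.empty, 0, 0, 0, 1) =
      (PySem.Set.ofList (lst.filter pvPosEven),
       PySem.Set.ofList (lst.filter pvNegEven),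
       PySem.Set.ofList (lst.filter pvPosOdd),
       ((PySem.Set.ofList (lst.filter pvPosEven)).map (fun n => n ^ 2)).sum,
       ((PySem.Set.ofList (lst.filter pvNegEven)).map (fun n => n ^ 2)).sum,
       ((lst.filter pvPosOdd).map (fun n => n ^ 3)).sum,
       (PySem.Set.ofList (lst.filter pvPosOdd)).foldl (fun p n => p * n) 1) := by
  induction lst using List.reverseRecOn with
  | nil => rfl
  | append_singleton l x ih =>
    rw [List.foldl_append, ih]
    simp only [List.foldl_cons, List.foldl_nil, List.filter_append, List.filter_cons,
      List.filter_nil]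
    by_cases hx0 : x = 0
    · subst hx0
      simp [pvStepA, pvPosEven, pvNegEven, pvPosOdd]
    by_cases hpos : x > 0
    · by_cases hev : (PySem.Int.mod x 2 == 0) = true
      · -- positive even
        have h1 : pvPosEven x = true := by unfold pvPosEven; rw [hev]; simp [hpos]
        have h2 : pvNegEven x = false := by unfold pvNegEven; simp; omega
        have h3 : pvPosOdd x = false := by unfold pvPosOdd; rw [hev]; simp
        rw [h1, h2, h3]
        simp only [Bool.false_eq_true, if_true, if_false, List.append_nil,
          PySem.Set.ofList_append_singleton]
        simp only [pvStepA]
        rw [if_pos hx0, if_pos hpos, if_pos hev]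
        by_cases hmem : x ∈ PySem.Set.ofList (l.filter pvPosEven)
        · rw [if_neg (fun h => h ((PySem.Set.contains_iff _ _).mpr hmem)),
            PySem.Set.add_of_mem hmem]
        · rw [if_pos (fun h => hmem ((PySem.Set.contains_iff _ _).mp h)),
            PySem.Set.add_of_not_mem hmem]
          simp
      · -- positive odd
        have hevb : (PySem.Int.mod x 2 == 0) = false := Bool.eq_false_iff.mpr hev
        have h1 : pvPosEven x = false := by unfold pvPosEven; rw [hevb]; simp
        have h2 : pvNegEven x = false := by unfold pvNegEven; simp; omega
        have h3 : pvPosOdd x = true := by unfold pvPosOdd; rw [hevb]; simp [hpos]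
        rw [h1, h2, h3]
        simp only [Bool.false_eq_true, if_true, if_false, List.append_nil,
          PySem.Set.ofList_append_singleton]
        simp only [pvStepA]
        rw [if_pos hx0, if_pos hpos, if_neg hev]
        by_cases hmem : x ∈ PySem.Set.ofList (l.filter pvPosOdd)
        · rw [if_neg (fun h => h ((PySem.Set.contains_iff _ _).mpr hmem)),
            PySem.Set.add_of_mem hmem]
          simp
        · rw [if_pos (fun h => hmem ((PySem.Set.contains_iff _ _).mp h)),
            PySem.Set.add_of_not_mem hmem]
          simp [List.foldl_append]
    · -- x < 0
      have hneg : x < 0 := by omega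
      by_cases hev : (PySem.Int.mod x 2 == 0) = true
      · have h1 : pvPosEven x = false := by unfold pvPosEven; simp; omega
        have h2 : pvNegEven x = true := by unfold pvNegEven; rw [hev]; simp [hneg]
        have h3 : pvPosOdd x = false := by unfold pvPosOdd; simp; omega
        rw [h1, h2, h3]
        simp only [Bool.false_eq_true, if_true, if_false, List.append_nil,
          PySem.Set.ofList_append_singleton]
        simp only [pvStepA]
        rw [if_pos hx0, if_neg hpos, if_pos ⟨hneg, hev⟩]
        by_cases hmem : x ∈ PySem.Set.ofList (l.filter pvNegEven)
        · rw [if_neg (fun h => h ((PySem.Set.contains_iff _ _).mpr hmem)),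
            PySem.Set.add_of_mem hmem]
        · rw [if_pos (fun h => hmem ((PySem.Set.contains_iff _ _).mp h)),
            PySem.Set.add_of_not_mem hmem]
          simp
      · have hevb : (PySem.Int.mod x 2 == 0) = false := Bool.eq_false_iff.mpr hev
        have h1 : pvPosEven x = false := by unfold pvPosEven; simp; omega
        have h2 : pvNegEven x = false := by unfold pvNegEven; rw [hevb]; simp
        have h3 : pvPosOdd x = false := by unfold pvPosOdd; simp; omega
        rw [h1, h2, h3]
        simp only [Bool.false_eq_true, if_false, List.append_nil]
        simp only [pvStepA]
        rw [if_pos hx0, if_neg hpos, if_neg (fun hc => hev hc.2)]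

-- ===== VERDICT (by name: the statement is the Claim_ definition above) =====
theorem calculate_special_tuples_spec : Claim_equal_calculate_special_tuples := by
  intro lst _
  unfold Spec_calculate_special_tuples calculate_special_tuples calculate_special_tuples_alt
  rw [pvLoopClosed]
  simp [PySem.Set.len, PySem.List.dedup_eq_ofList]
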